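-- pv_equiv track=rewrite | github.com/fish-shell/fish-site | tools/htmlize_relnotes.py | backticks_to_code
-- ===== SOURCE A (Python) =====
-- def backticks_to_code(contents):
--     """ Replaces `foo` with <code>foo</code> """
--     result_lines = []
--     for line in contents.split('\n'):
--         comps = line.split('`')
--         # <code> goes around every odd item
--         for idx in range(len(comps)):
--             if idx % 2 == 1:
--                 comps[idx] = '<code>%s</code>' % comps[idx]
--         result_lines.append(''.join(comps))
--     return '\n'.join(result_lines)
-- ===== SOURCE B (Python) =====
-- def backticks_to_code(contents):
--     """ Replaces `foo` with <code>foo</code> """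
--     result_lines = []
--     for line in contents.split('\n'):
--         out = []
--         in_code = False
--         for ch in line:
--             if ch == '`':
--                 out.append('</code>' if in_code else '<code>')
--                 in_code = not in_code
--             else:
--                 out.append(ch)
--         if in_code:
--             out.append('</code>')
--         result_lines.append(''.join(out))
--     return '\n'.join(result_lines)
-- ===== Notes on version B (the rewrite author's own statement) =====
-- stated objective: alternative
-- what changed: Per line, B replaces A's split-on-backtick list plus a second pass wrapping odd-indexed segments with a single character scan that keeps an in_code toggle, emitting <code>/</code> at each backtick and closing an open span at end of line.
import Mathlib
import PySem

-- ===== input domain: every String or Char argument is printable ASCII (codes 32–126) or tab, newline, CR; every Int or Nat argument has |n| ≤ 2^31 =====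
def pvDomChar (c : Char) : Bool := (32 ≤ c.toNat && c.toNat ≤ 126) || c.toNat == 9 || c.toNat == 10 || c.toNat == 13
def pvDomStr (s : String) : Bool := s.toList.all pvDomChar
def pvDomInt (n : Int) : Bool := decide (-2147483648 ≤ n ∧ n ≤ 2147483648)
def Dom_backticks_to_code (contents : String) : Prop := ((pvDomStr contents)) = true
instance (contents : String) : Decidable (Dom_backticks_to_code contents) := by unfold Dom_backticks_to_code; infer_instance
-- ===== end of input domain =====

-- ===== PORT A =====
-- B replaces A's per-line split-on-backtick + wrap-odd-indices pass by a single
-- character scan with an in_code toggle (objective: alternative decomposition, same cost).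
-- helper: the per-line body of A (line.split('`'); wrap odd indices; ''.join)
def btcWrapOdd (idx : Nat) : List (List Char) → List (List Char)
  | [] => []
  | c :: rest =>
    (if idx % 2 == 1 then "<code>".toList ++ c ++ "</code>".toList else c) :: btcWrapOdd (idx + 1) rest

def btcLineA (line : List Char) : List Char :=
  PySem.Chars.join [] (btcWrapOdd 0 (PySem.Chars.splitOn line ['`']))

def backticks_to_code (contents : String) : String :=
  String.ofList
    (PySem.Chars.join ['\n'] ((PySem.Chars.splitOn contents.toList ['\n']).map btcLineA))

-- ===== PORT B =====
-- helper: the per-line scan of B (in_code toggle; close an open span at end of line)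
def btcScanB : List Char → Bool → List Char
  | [], inCode => if inCode then "</code>".toList else []
  | c :: rest, inCode =>
    if c = '`' then
      (if inCode then "</code>".toList else "<code>".toList) ++ btcScanB rest (!inCode)
    else
      c :: btcScanB rest inCode

def backticks_to_code_alt (contents : String) : String :=
  String.ofList
    (PySem.Chars.join ['\n'] ((PySem.Chars.splitOn contents.toList ['\n']).map (fun l => btcScanB l false)))

-- ===== PRECONDITION & SPEC =====
def Spec_backticks_to_code (contents : String) (out : String) : Prop := out = backticks_to_code_alt contents
instance (contents : String) (out : String) : Decidable (Spec_backticks_to_code contents out) := by unfold Spec_backticks_to_code; infer_instance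

-- ===== CLAIM (what is proved, stated in full; the proofs are below) =====
def Claim_equal_backticks_to_code : Prop := ∀ (contents : String), Dom_backticks_to_code contents → Spec_backticks_to_code contents (backticks_to_code contents)

-- ===== LEMMAS AND PROOFS =====

-- a direct recursive characterisation of single-character splitOn
def btcSplit (sep : Char) : List Char → List (List Char)
  | [] => [[]]
  | c :: rest =>
    if c = sep then [] :: btcSplit sep rest
    else
      match btcSplit sep rest with
      | [] => [[c]]          -- unreachable
      | h :: t => (c :: h) :: t

theorem btcSplit_ne_nil (sep : Char) (l : List Char) : btcSplit sep l ≠ [] := by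
  cases l with
  | nil => simp [btcSplit]
  | cons c rest =>
    simp only [btcSplit]
    split
    · simp
    · split <;> simp

theorem splitOn_go_spec (sep : Char) :
    ∀ fuel l cur acc, l.length < fuel →
      PySem.Chars.splitOn.go [sep] fuel l cur acc =
        acc.reverse ++ ((btcSplit sep l).modifyHead (cur.reverse ++ ·)) := by
  intro fuel
  induction fuel with
  | zero => intro l cur acc h; omega
  | succ f ih =>
    intro l cur acc h
    cases l with
    | nil => simp [PySem.Chars.splitOn.go, btcSplit]
    | cons c rest =>
      simp only [PySem.Chars.splitOn.go, List.isPrefixOf, List.length_cons] at *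
      by_cases hc : sep = c
      · subst hc
        simp only [beq_self_eq_true, Bool.true_and, if_pos, List.length_nil,
          Nat.zero_add, List.drop_succ_cons, List.drop_zero]
        rw [ih rest [] (cur.reverse :: acc) (by omega)]
        have hne := btcSplit_ne_nil sep rest
        cases hs : btcSplit sep rest with
        | nil => exact absurd hs hne
        | cons h t => simp [btcSplit, hs]
      · have : (sep == c) = false := by simp [hc]
        simp only [this, Bool.false_and, if_neg, Bool.false_eq_true, not_false_eq_true]
        rw [ih rest (c :: cur) acc (by omega)]
        have hne := btcSplit_ne_nil sep rest
        cases hs : btcSplit sep rest with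
        | nil => exact absurd hs hne
        | cons h t =>
          have hcne : ¬ (c = sep) := fun hh => hc hh.symm
          simp [btcSplit, hs, hcne]

theorem splitOn_single (sep : Char) (l : List Char) :
    PySem.Chars.splitOn l [sep] = btcSplit sep l := by
  rw [PySem.Chars.splitOn, splitOn_go_spec sep (l.length + 1) l [] [] (by omega)]
  have hne := btcSplit_ne_nil sep l
  cases hs : btcSplit sep l with
  | nil => exact absurd hs hne
  | cons h t => simp

-- the "already inside / outside a span" join of segments that btcScanB produces
def btcWrapJoin : Bool → List (List Char) → List Char
  | b, [] => if b then "</code>".toList else []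
  | b, s :: rest =>
    s ++ (if rest.isEmpty then (if b then "</code>".toList else [])
          else (if b then "</code>".toList else "<code>".toList) ++ btcWrapJoin (!b) rest)

theorem scanB_eq_wrapJoin (l : List Char) : ∀ b, btcScanB l b = btcWrapJoin b (btcSplit '`' l) := by
  induction l with
  | nil => intro b; cases b <;> simp [btcScanB, btcSplit, btcWrapJoin]
  | cons c rest ih =>
    intro b
    by_cases hc : c = '`'
    · subst hc
      have hne := btcSplit_ne_nil '`' rest
      cases hs : btcSplit '`' rest with
      | nil => exact absurd hs hne
      | cons h t =>
        simp [btcScanB, btcSplit, hs, btcWrapJoin, ih, List.isEmpty_cons]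
    · have hne := btcSplit_ne_nil '`' rest
      cases hs : btcSplit '`' rest with
      | nil => exact absurd hs hne
      | cons h t =>
        simp only [btcScanB, if_neg hc, btcSplit, hs, ih b, btcWrapJoin]
        cases t <;> cases b <;> simp

theorem join_nil_eq_flatten (xs : List (List Char)) : PySem.Chars.join [] xs = xs.flatten := by
  induction xs with
  | nil => simp [PySem.Chars.join, List.intercalate]
  | cons h t ih =>
    cases t with
    | nil => simp [PySem.Chars.join, List.intercalate]
    | cons h2 t2 =>
      simp only [PySem.Chars.join, List.intercalate] at *
      simp [List.intersperse, ih]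

theorem wrapOdd_flatten (segs : List (List Char)) :
    ∀ k, segs ≠ [] →
      (btcWrapOdd k segs).flatten =
        (if k % 2 == 1 then "<code>".toList else []) ++ btcWrapJoin (k % 2 == 1) segs := by
  induction segs with
  | nil => intro k h; exact absurd rfl h
  | cons s rest ih =>
    intro k _
    cases rest with
    | nil =>
      cases hk : k % 2 == 1 <;>
        simp [btcWrapOdd, btcWrapJoin, hk]
    | cons s2 t2 =>
      have hodd : ((k + 1) % 2 == 1) = (!(k % 2 == 1)) := by
        rcases Nat.even_or_odd k with hk | hk
        · have h1 : k % 2 = 0 := Nat.even_iff.mp hk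
          have h2 : (k + 1) % 2 = 1 := by omega
          simp [h1, h2]
        · have h1 : k % 2 = 1 := Nat.odd_iff.mp hk
          have h2 : (k + 1) % 2 = 0 := by omega
          simp [h1, h2]
      rw [show btcWrapOdd k (s :: s2 :: t2) =
            (if k % 2 == 1 then "<code>".toList ++ s ++ "</code>".toList else s) ::
              btcWrapOdd (k + 1) (s2 :: t2) from rfl]
      rw [List.flatten_cons, ih (k + 1) (by simp), hodd]
      cases hk : k % 2 == 1 <;>
        simp [btcWrapJoin, List.isEmpty_cons]

theorem lineA_eq_scanB (l : List Char) : btcLineA l = btcScanB l false := by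
  rw [btcLineA, splitOn_single, join_nil_eq_flatten, scanB_eq_wrapJoin]
  rw [wrapOdd_flatten (btcSplit '`' l) 0 (btcSplit_ne_nil '`' l)]
  simp

-- ===== VERDICT (by name: the statement is the Claim_ definition above) =====
theorem backticks_to_code_spec : Claim_equal_backticks_to_code := by
  intro contents _
  unfold Spec_backticks_to_code backticks_to_code backticks_to_code_alt
  congr 2
  exact List.map_congr_left (fun l _ => lineA_eq_scanB l)
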